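-- pv_equiv track=rewrite | github.com/oigomezz/Retos | Hackerearth/Algorithms/Searching/Linear-Search/Equal-Parity-Sum/solution.py | solve
-- ===== SOURCE A (Python) =====
-- def solve(a, n):
--     even, odd = sum(a[i] for i in range(0, n, 2)), sum(a[i] for i in range(1, n, 2))
--     d = abs(even - odd)
--     if d % 2 == 1:
--         return "NO"
--     if d == 0:
--         return "YES"
--     if even < odd:
--         a = [0] + a
--     existed = {0}
--     target = d // 2
--     o, e, v = 0, 0, 0
--     for i, x in enumerate(a):
--         if i & 1:
--             o += a[i]
--         else:
--             e += a[i]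
--         v = e - o
--         if v - target in existed:
--             return "YES"
--         existed.add(v)
--     return "NO"
-- ===== SOURCE B (Python) =====
-- def solve(a, n):
--     even = sum(a[i] for i in range(0, n, 2))
--     odd = sum(a[i] for i in range(1, n, 2))
--     d = abs(even - odd)
--     if d % 2 == 1:
--         return "NO"
--     if d == 0:
--         return "YES"
--     target = d // 2
--     s = 1 if even >= odd else -1
--     w = [s * x if k % 2 == 0 else -s * x for k, x in enumerate(a)]
--     suffix = w
--     while suffix:
--         acc = 0
--         for y in suffix:
--             acc += y
--             if acc == target:
--                 return "YES"
--         suffix = suffix[1:]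
--     return "NO"
-- ===== Notes on version B (the rewrite author's own statement) =====
-- stated objective: alternative
-- what changed: B drops A's single-pass hash-set of seen prefix values (and its [0]-prepend) entirely: it builds the sign-normalised list once and then brute-forces all contiguous segments with a nested loop, checking whether any segment's sum equals target.
import Mathlib
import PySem

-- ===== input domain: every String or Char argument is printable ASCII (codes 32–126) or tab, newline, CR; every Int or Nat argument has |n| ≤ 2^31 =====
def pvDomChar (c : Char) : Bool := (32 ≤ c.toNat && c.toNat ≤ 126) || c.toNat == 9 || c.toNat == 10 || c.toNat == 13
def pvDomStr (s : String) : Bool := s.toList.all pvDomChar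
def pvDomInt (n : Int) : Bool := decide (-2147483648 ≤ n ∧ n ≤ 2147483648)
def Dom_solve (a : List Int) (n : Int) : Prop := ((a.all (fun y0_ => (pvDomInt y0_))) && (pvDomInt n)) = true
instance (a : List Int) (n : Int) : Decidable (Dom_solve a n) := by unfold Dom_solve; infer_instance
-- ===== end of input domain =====

-- B replaces A's single-pass hash-set of seen prefix values (and its [0]-prepend) by a
-- nested brute-force scan over all contiguous segments of the sign-normalised list.

-- ===== PORT A =====
-- A's for-loop over enumerate(a) with early return; state (existed, o, e), v = e - o after each step.
-- 'i & 1' on the (nonnegative) enumerate index is written as 'mod i 2 == 1'.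
def solveLoopA : List (Int × Int) → PySem.Set Int → Int → Int → Int → String
  | [], _, _, _, _ => "NO"
  | (i, x) :: rest, existed, o, e, target =>
    let o' := if PySem.Int.mod i 2 == 1 then o + x else o
    let e' := if PySem.Int.mod i 2 == 1 then e else e + x
    let v := e' - o'
    if PySem.Set.contains existed (v - target) then "YES"
    else solveLoopA rest (PySem.Set.add existed v) o' e' target

def solve (a : List Int) (n : Int) : String :=
  let even := (PySem.List.pyRange 0 n 2).foldl (fun s i => s + PySem.List.pyGetD a i 0) 0
  let odd := (PySem.List.pyRange 1 n 2).foldl (fun s i => s + PySem.List.pyGetD a i 0) 0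
  let d := |even - odd|
  if PySem.Int.mod d 2 == 1 then "NO"
  else if d == 0 then "YES"
  else
    let a' := if even < odd then 0 :: a else a
    solveLoopA (PySem.List.enumerate a' 0) (PySem.Set.ofList [0]) 0 0 (PySem.Int.floordiv d 2)

-- ===== PORT B =====
-- Source B's inner 'for y in suffix: acc += y; if acc == target: return "YES"'.
def segAcc : List Int → Int → Int → Bool
  | [], _, _ => false
  | y :: ys, acc, t => if acc + y == t then true else segAcc ys (acc + y) t

-- Source B's outer 'while suffix: … suffix = suffix[1:]'.
def segAny : List Int → Int → Bool
  | [], _ => false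
  | y :: ys, t => if segAcc (y :: ys) 0 t then true else segAny ys t

def solve_alt (a : List Int) (n : Int) : String :=
  let even := (PySem.List.pyRange 0 n 2).foldl (fun s i => s + PySem.List.pyGetD a i 0) 0
  let odd := (PySem.List.pyRange 1 n 2).foldl (fun s i => s + PySem.List.pyGetD a i 0) 0
  let d := |even - odd|
  if PySem.Int.mod d 2 == 1 then "NO"
  else if d == 0 then "YES"
  else
    let target := PySem.Int.floordiv d 2
    let s : Int := if even ≥ odd then 1 else -1
    let w := (PySem.List.enumerate a 0).map
      (fun kx => if PySem.Int.mod kx.1 2 == 0 then s * kx.2 else -(s * kx.2))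
    if segAny w target then "YES" else "NO"

-- ===== PRECONDITION & SPEC =====
-- Pre_ excludes n > len(a), where both Pythons raise IndexError in the even/odd sums.
def Pre_solve (a : List Int) (n : Int) : Prop := n ≤ (a.length : Int)
instance (a : List Int) (n : Int) : Decidable (Pre_solve a n) := by unfold Pre_solve; infer_instance
def pvWitness_solve : List Int × Int := ([1, 2, 3, 4], 4)

def Spec_solve (a : List Int) (n : Int) (out : String) : Prop := out = solve_alt a n
instance (a : List Int) (n : Int) (out : String) : Decidable (Spec_solve a n out) := by unfold Spec_solve; infer_instance

-- ===== CLAIM (what is proved, stated in full; the proofs are below) =====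
def Claim_equal_solve : Prop := ∀ (a : List Int) (n : Int), Dom_solve a n → Pre_solve a n → Spec_solve a n (solve a n)

-- ===== LEMMAS AND PROOFS =====

-- signed copy of xs, signs by parity of position starting at parity j
def wsig : Nat → List Int → List Int
  | _, [] => []
  | j, x :: xs => (if j % 2 = 0 then x else -x) :: wsig (j + 1) xs

-- both programs decide this proposition: two prefix sums of W at positions j < i differ by t
def Pairs (W : List Int) (t : Int) : Prop :=
  ∃ i j : Nat, j < i ∧ i ≤ W.length ∧ (W.take i).sum - (W.take j).sum = t

lemma wsig_length (xs : List Int) : ∀ j, (wsig j xs).length = xs.length := by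
  induction xs with
  | nil => intro j; simp [wsig]
  | cons x xs ih => intro j; simp [wsig, ih]

lemma wsig_succ (xs : List Int) : ∀ j, wsig (j + 1) xs = (wsig j xs).map (fun y => -y) := by
  induction xs with
  | nil => intro j; simp [wsig]
  | cons x xs ih =>
    intro j
    simp only [wsig, List.map_cons, ih (j + 1)]
    congr 1
    rcases Nat.even_or_odd j with h | h
    · have h0 : j % 2 = 0 := Nat.even_iff.mp h
      have h1 : (j + 1) % 2 = 1 := by omega
      simp [h0, h1]
    · have h0 : j % 2 = 1 := Nat.odd_iff.mp h
      have h1 : (j + 1) % 2 = 0 := by omega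
      simp [h0, h1]

lemma segAcc_iff (ys : List Int) : ∀ (acc t : Int),
    segAcc ys acc t = true ↔ ∃ k, 1 ≤ k ∧ k ≤ ys.length ∧ acc + (ys.take k).sum = t := by
  induction ys with
  | nil =>
    intro acc t
    simp [segAcc]
  | cons y ys ih =>
    intro acc t
    by_cases h : acc + y = t
    · simp only [segAcc, h]
      constructor
      · intro _
        exact ⟨1, by omega, by simp, by simpa using h⟩
      · intro _; simp
    · have hb : (acc + y == t) = false := by simp [h]
      simp only [segAcc, hb, Bool.false_eq_true, if_false]
      rw [ih (acc + y) t]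
      constructor
      · rintro ⟨k, hk1, hk2, hs⟩
        refine ⟨k + 1, by omega, by simp; omega, ?_⟩
        simp only [List.take_succ_cons, List.sum_cons]
        linarith
      · rintro ⟨k, hk1, hk2, hs⟩
        cases k with
        | zero => omega
        | succ k0 =>
          simp only [List.take_succ_cons, List.sum_cons] at hs
          rcases Nat.eq_zero_or_pos k0 with rfl | h0
          · exact absurd (by simpa using hs) h
          · exact ⟨k0, h0, by simp at hk2; omega, by linarith⟩

lemma segAny_iff (W : List Int) (t : Int) :
    segAny W t = true ↔ ∃ l k, 1 ≤ k ∧ l + k ≤ W.length ∧ ((W.drop l).take k).sum = t := by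
  induction W with
  | nil => simp [segAny]
  | cons y ys ih =>
    by_cases h : segAcc (y :: ys) 0 t = true
    · simp only [segAny, h, if_true]
      constructor
      · intro _
        obtain ⟨k, hk1, hk2, hs⟩ := (segAcc_iff _ _ _).mp h
        exact ⟨0, k, hk1, by simpa using hk2, by simpa using hs⟩
      · intro _; trivial
    · have hb : segAcc (y :: ys) 0 t = false := by
        cases hx : segAcc (y :: ys) 0 t
        · rfl
        · exact absurd hx h
      simp only [segAny, hb, Bool.false_eq_true, if_false]
      rw [ih]
      constructor
      · rintro ⟨l, k, hk1, hk2, hs⟩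
        refine ⟨l + 1, k, hk1, by simp; omega, by simpa using hs⟩
      · rintro ⟨l, k, hk1, hk2, hs⟩
        cases l with
        | zero =>
          exfalso
          apply h
          apply (segAcc_iff _ _ _).mpr
          exact ⟨k, hk1, by simpa using hk2, by simpa using hs⟩
        | succ l0 =>
          exact ⟨l0, k, hk1, by simp at hk2 ⊢; omega, by simpa using hs⟩

lemma sum_take_add (W : List Int) (m k : Nat) :
    (W.take (m + k)).sum = (W.take m).sum + ((W.drop m).take k).sum := by
  rw [List.take_add, List.sum_append]

lemma pairs_iff_seg (W : List Int) (t : Int) :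
    Pairs W t ↔ ∃ l k, 1 ≤ k ∧ l + k ≤ W.length ∧ ((W.drop l).take k).sum = t := by
  unfold Pairs
  constructor
  · rintro ⟨i, j, hji, hi, hs⟩
    refine ⟨j, i - j, by omega, by omega, ?_⟩
    have := sum_take_add W j (i - j)
    rw [show j + (i - j) = i from by omega] at this
    linarith
  · rintro ⟨l, k, hk1, hk2, hs⟩
    refine ⟨l + k, l, by omega, hk2, ?_⟩
    rw [sum_take_add W l k]
    linarith

lemma loopA_char (xs : List Int) : ∀ (j : Nat) (existed : PySem.Set Int) (o e t : Int),
    (solveLoopA (PySem.List.enumerate xs (j : Int)) existed o e t = "YES") ↔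
    ∃ i, 1 ≤ i ∧ i ≤ xs.length ∧
      ((e - o + ((wsig j xs).take i).sum - t) ∈ existed ∨
       ∃ i', 1 ≤ i' ∧ i' < i ∧
         e - o + ((wsig j xs).take i).sum - t = e - o + ((wsig j xs).take i').sum) := by
  induction xs with
  | nil =>
    intro j existed o e t
    simp [PySem.List.enumerate_nil, solveLoopA]
  | cons x xs ih =>
    intro j existed o e t
    rw [PySem.List.enumerate_cons]
    have hcast : ((j : Int) + 1) = ((j + 1 : Nat) : Int) := by push_cast; ring
    have hmod : PySem.Int.mod (j : Int) 2 = ((j % 2 : Nat) : Int) := by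
      rw [PySem.Int.mod_eq_emod_of_pos (by norm_num)]
      omega
    -- the head element of wsig j (x :: xs) and the loop's new value v
    by_cases hp : j % 2 = 1
    · -- odd index: o += x, head of wsig is -x
      have hj2 : ((j : Int)) % 2 = 1 := by omega
      have hm : (PySem.Int.mod (j : Int) 2 == 1) = true := by rw [hmod, hp]; norm_num
      have hw : wsig j (x :: xs) = (-x) :: wsig (j + 1) xs := by
        simp [wsig, show ¬ j % 2 = 0 from by omega]
      have step : solveLoopA (((j : Int), x) :: PySem.List.enumerate xs ((j : Int) + 1)) existed o e t
          = if PySem.Set.contains existed (e - (o + x) - t) then "YES"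
            else solveLoopA (PySem.List.enumerate xs ((j : Int) + 1))
              (PySem.Set.add existed (e - (o + x))) (o + x) e t := by
        simp [solveLoopA, hj2]
      rw [step, hcast, hw]
      by_cases hc : PySem.Set.contains existed (e - (o + x) - t) = true
      · rw [if_pos hc]
        constructor
        · intro _
          refine ⟨1, le_refl 1, by simp, Or.inl ?_⟩
          have : e - o + (((-x) :: wsig (j + 1) xs).take 1).sum - t = e - (o + x) - t := by
            simp; ring
          rw [this]
          exact (PySem.Set.contains_iff _ _).mp hc
        · intro _; rfl
      · rw [if_neg hc]
        rw [ih (j + 1) (PySem.Set.add existed (e - (o + x))) (o + x) e t]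
        constructor
        · rintro ⟨k, hk1, hk2, hd⟩
          refine ⟨k + 1, by omega, by simp; omega, ?_⟩
          have hsum : e - o + ((((-x) :: wsig (j + 1) xs).take (k + 1)).sum)
              = e - (o + x) + ((wsig (j + 1) xs).take k).sum := by
            simp [List.take_succ_cons]; ring
          rcases hd with hmem | hmem
          · rcases (PySem.Set.mem_add _ _ _).mp hmem with h' | h'
            · left; rw [show e - o + (((-x) :: wsig (j + 1) xs).take (k + 1)).sum - t
                = e - (o + x) + ((wsig (j + 1) xs).take k).sum - t from by rw [hsum]]
              exact h'
            · right
              refine ⟨1, le_refl 1, by omega, ?_⟩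
              have h1 : e - o + (((-x) :: wsig (j + 1) xs).take 1).sum = e - (o + x) := by
                simp; ring
              rw [hsum, h1]
              linarith [h']
          · obtain ⟨k', hk'1, hk'2, heq⟩ := hmem
            right
            refine ⟨k' + 1, by omega, by omega, ?_⟩
            have hsum' : e - o + ((((-x) :: wsig (j + 1) xs).take (k' + 1)).sum)
                = e - (o + x) + ((wsig (j + 1) xs).take k').sum := by
              simp [List.take_succ_cons]; ring
            rw [hsum, hsum']
            linarith [heq]
        · rintro ⟨i, hi1, hi2, hd⟩
          cases i with
          | zero => omega
          | succ i0 =>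
            have hsum : e - o + ((((-x) :: wsig (j + 1) xs).take (i0 + 1)).sum)
                = e - (o + x) + ((wsig (j + 1) xs).take i0).sum := by
              simp [List.take_succ_cons]; ring
            rcases Nat.eq_zero_or_pos i0 with rfl | hpos
            · exfalso
              rcases hd with hmem | ⟨i', hi'1, hi'2, _⟩
              · apply hc
                apply (PySem.Set.contains_iff _ _).mpr
                rw [show e - o + (((-x) :: wsig (j + 1) xs).take 1).sum - t
                    = e - (o + x) - t from by simp; ring] at hmem
                exact hmem
              · omega
            · refine ⟨i0, hpos, by simp at hi2; omega, ?_⟩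
              rcases hd with hmem | ⟨i', hi'1, hi'2, heq⟩
              · left
                apply (PySem.Set.mem_add _ _ _).mpr
                left
                rw [← hsum]
                exact hmem
              · cases i' with
                | zero => omega
                | succ i0' =>
                  have hsum' : e - o + ((((-x) :: wsig (j + 1) xs).take (i0' + 1)).sum)
                      = e - (o + x) + ((wsig (j + 1) xs).take i0').sum := by
                    simp [List.take_succ_cons]; ring
                  rcases Nat.eq_zero_or_pos i0' with rfl | hpos'
                  · -- i' = 1 : the matching earlier value is v itself
                    left
                    apply (PySem.Set.mem_add _ _ _).mpr
                    right
                    have h1 : e - o + (((-x) :: wsig (j + 1) xs).take 1).sum = e - (o + x) := by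
                      simp; ring
                    rw [hsum, h1] at heq
                    linarith [heq]
                  · right
                    refine ⟨i0', hpos', by omega, ?_⟩
                    rw [← hsum, ← hsum']
                    exact heq
    · -- even index: e += x, head of wsig is x
      have hp0 : j % 2 = 0 := by omega
      have hj2 : ¬ ((j : Int)) % 2 = 1 := by omega
      have hm : (PySem.Int.mod (j : Int) 2 == 1) = false := by rw [hmod, hp0]; norm_num
      have hw : wsig j (x :: xs) = x :: wsig (j + 1) xs := by simp [wsig, hp0]
      have step : solveLoopA (((j : Int), x) :: PySem.List.enumerate xs ((j : Int) + 1)) existed o e t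
          = if PySem.Set.contains existed (e + x - o - t) then "YES"
            else solveLoopA (PySem.List.enumerate xs ((j : Int) + 1))
              (PySem.Set.add existed (e + x - o)) o (e + x) t := by
        simp [solveLoopA, hj2]
      rw [step, hcast, hw]
      by_cases hc : PySem.Set.contains existed (e + x - o - t) = true
      · rw [if_pos hc]
        constructor
        · intro _
          refine ⟨1, le_refl 1, by simp, Or.inl ?_⟩
          have : e - o + ((x :: wsig (j + 1) xs).take 1).sum - t = e + x - o - t := by
            simp; ring
          rw [this]
          exact (PySem.Set.contains_iff _ _).mp hc
        · intro _; rfl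
      · rw [if_neg hc]
        rw [ih (j + 1) (PySem.Set.add existed (e + x - o)) o (e + x) t]
        constructor
        · rintro ⟨k, hk1, hk2, hd⟩
          refine ⟨k + 1, by omega, by simp; omega, ?_⟩
          have hsum : e - o + (((x :: wsig (j + 1) xs).take (k + 1)).sum)
              = e + x - o + ((wsig (j + 1) xs).take k).sum := by
            simp [List.take_succ_cons]; ring
          rcases hd with hmem | hmem
          · rcases (PySem.Set.mem_add _ _ _).mp hmem with h' | h'
            · left; rw [show e - o + ((x :: wsig (j + 1) xs).take (k + 1)).sum - t
                = e + x - o + ((wsig (j + 1) xs).take k).sum - t from by rw [hsum]]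
              exact h'
            · right
              refine ⟨1, le_refl 1, by omega, ?_⟩
              have h1 : e - o + ((x :: wsig (j + 1) xs).take 1).sum = e + x - o := by
                simp; ring
              rw [hsum, h1]
              linarith [h']
          · obtain ⟨k', hk'1, hk'2, heq⟩ := hmem
            right
            refine ⟨k' + 1, by omega, by omega, ?_⟩
            have hsum' : e - o + (((x :: wsig (j + 1) xs).take (k' + 1)).sum)
                = e + x - o + ((wsig (j + 1) xs).take k').sum := by
              simp [List.take_succ_cons]; ring
            rw [hsum, hsum']
            linarith [heq]
        · rintro ⟨i, hi1, hi2, hd⟩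
          cases i with
          | zero => omega
          | succ i0 =>
            have hsum : e - o + (((x :: wsig (j + 1) xs).take (i0 + 1)).sum)
                = e + x - o + ((wsig (j + 1) xs).take i0).sum := by
              simp [List.take_succ_cons]; ring
            rcases Nat.eq_zero_or_pos i0 with rfl | hpos
            · exfalso
              rcases hd with hmem | ⟨i', hi'1, hi'2, _⟩
              · apply hc
                apply (PySem.Set.contains_iff _ _).mpr
                rw [show e - o + ((x :: wsig (j + 1) xs).take 1).sum - t
                    = e + x - o - t from by simp; ring] at hmem
                exact hmem
              · omega
            · refine ⟨i0, hpos, by simp at hi2; omega, ?_⟩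
              rcases hd with hmem | ⟨i', hi'1, hi'2, heq⟩
              · left
                apply (PySem.Set.mem_add _ _ _).mpr
                left
                rw [← hsum]
                exact hmem
              · cases i' with
                | zero => omega
                | succ i0' =>
                  have hsum' : e - o + (((x :: wsig (j + 1) xs).take (i0' + 1)).sum)
                      = e + x - o + ((wsig (j + 1) xs).take i0').sum := by
                    simp [List.take_succ_cons]; ring
                  rcases Nat.eq_zero_or_pos i0' with rfl | hpos'
                  · left
                    apply (PySem.Set.mem_add _ _ _).mpr
                    right
                    have h1 : e - o + ((x :: wsig (j + 1) xs).take 1).sum = e + x - o := by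
                      simp; ring
                    rw [hsum, h1] at heq
                    linarith [heq]
                  · right
                    refine ⟨i0', hpos', by omega, ?_⟩
                    rw [← hsum, ← hsum']
                    exact heq

lemma loopA_top (a' : List Int) (t : Int) :
    (solveLoopA (PySem.List.enumerate a' 0) (PySem.Set.ofList [0]) 0 0 t = "YES") ↔
    Pairs (wsig 0 a') t := by
  have h := loopA_char a' 0 (PySem.Set.ofList [0]) 0 0 t
  simp only [Nat.cast_zero] at h
  rw [h]
  unfold Pairs
  constructor
  · rintro ⟨i, hi1, hi2, hd⟩
    rcases hd with hmem | ⟨i', hi'1, hi'2, heq⟩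
    · refine ⟨i, 0, hi1, by rw [wsig_length]; exact hi2, ?_⟩
      have h0 := (PySem.Set.mem_ofList [0] _).mp hmem
      simp at h0
      simp
      linarith [h0]
    · refine ⟨i, i', hi'2, by rw [wsig_length]; exact hi2, ?_⟩
      linarith [heq]
  · rintro ⟨i, jj, hji, hi, hs⟩
    refine ⟨i, by omega, by rwa [wsig_length] at hi, ?_⟩
    rcases Nat.eq_zero_or_pos jj with rfl | hj
    · left
      apply (PySem.Set.mem_ofList [0] _).mpr
      simp at hs ⊢
      linarith [hs]
    · right
      exact ⟨jj, hj, hji, by linarith [hs]⟩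

lemma pairs_cons_zero (W : List Int) (t : Int) (ht : t ≠ 0) :
    Pairs ((0 : Int) :: W) t ↔ Pairs W t := by
  unfold Pairs
  have hsum : ∀ m : Nat, (((0 : Int) :: W).take (m + 1)).sum = (W.take m).sum := by
    intro m; simp [List.take_succ_cons]
  constructor
  · rintro ⟨i, j, hji, hi, hs⟩
    cases i with
    | zero => omega
    | succ i0 =>
      cases j with
      | zero =>
        have hs' : (W.take i0).sum = t := by
          rw [hsum i0] at hs
          simpa using hs
        rcases Nat.eq_zero_or_pos i0 with rfl | h0
        · exact absurd hs'.symm (by simpa using ht)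
        · exact ⟨i0, 0, h0, by simp at hi; omega, by simpa using hs'⟩
      | succ j0 =>
        exact ⟨i0, j0, by omega, by simp at hi; omega, by rw [← hsum i0, ← hsum j0]; exact hs⟩
  · rintro ⟨i, j, hji, hi, hs⟩
    exact ⟨i + 1, j + 1, by omega, by simp; omega, by rw [hsum i, hsum j]; exact hs⟩

lemma enum_map (s : Int) (a : List Int) : ∀ (j : Nat),
    (PySem.List.enumerate a (j : Int)).map
        (fun kx => if PySem.Int.mod kx.1 2 == 0 then s * kx.2 else -(s * kx.2))
      = (wsig j a).map (fun y => s * y) := by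
  induction a with
  | nil => intro j; simp [PySem.List.enumerate_nil, wsig]
  | cons x xs ih =>
    intro j
    rw [PySem.List.enumerate_cons]
    have hcast : ((j : Int) + 1) = ((j + 1 : Nat) : Int) := by push_cast; ring
    simp only [List.map_cons, wsig, hcast, ih (j + 1)]
    congr 1
    have hmod : PySem.Int.mod (j : Int) 2 = ((j % 2 : Nat) : Int) := by
      rw [PySem.Int.mod_eq_emod_of_pos (by norm_num)]
      omega
    by_cases hp : j % 2 = 0
    · rw [hmod, hp]
      norm_num
    · have hp1 : j % 2 = 1 := by omega
      rw [hmod, hp1]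
      norm_num

lemma loopA_yes_or_no : ∀ (l : List (Int × Int)) (ex : PySem.Set Int) (o e t : Int),
    solveLoopA l ex o e t = "YES" ∨ solveLoopA l ex o e t = "NO" := by
  intro l
  induction l with
  | nil => intro ex o e t; right; rfl
  | cons p rest ih =>
    intro ex o e t
    obtain ⟨i, x⟩ := p
    simp only [solveLoopA]
    split_ifs <;> first | (left; rfl) | exact ih _ _ _ _

lemma map_neg_one (a : List Int) : (wsig 0 a).map (fun y => (-1 : Int) * y) = wsig 1 a := by
  rw [wsig_succ a 0]
  apply List.map_congr_left
  intro y _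
  ring

lemma tail_eq (a : List Int) (even odd t : Int) (ht : 0 < t) :
    solveLoopA (PySem.List.enumerate (if even < odd then 0 :: a else a) 0)
        (PySem.Set.ofList [0]) 0 0 t
      = (if segAny ((PySem.List.enumerate a 0).map
            (fun kx => if PySem.Int.mod kx.1 2 == 0
              then (if even ≥ odd then (1 : Int) else -1) * kx.2
              else -((if even ≥ odd then (1 : Int) else -1) * kx.2))) t
          then "YES" else "NO") := by
  have hmap := enum_map (if even ≥ odd then (1 : Int) else -1) a 0
  simp only [Nat.cast_zero] at hmap
  rw [hmap]
  by_cases heo : even < odd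
  · have hge : ¬ even ≥ odd := by omega
    simp only [heo, hge, if_true, if_false]
    rw [map_neg_one]
    have hA : wsig 0 ((0 : Int) :: a) = (0 : Int) :: wsig 1 a := by simp [wsig]
    by_cases hp : Pairs (wsig 1 a) t
    · have hseg : segAny (wsig 1 a) t = true :=
        (segAny_iff _ _).mpr ((pairs_iff_seg _ _).mp hp)
      rw [hseg, if_pos rfl]
      apply (loopA_top _ t).mpr
      rw [hA]
      exact (pairs_cons_zero _ t (by omega)).mpr hp
    · have hseg : segAny (wsig 1 a) t = false := by
        cases hx : segAny (wsig 1 a) t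
        · rfl
        · exact absurd ((pairs_iff_seg _ _).mpr ((segAny_iff _ _).mp hx)) hp
      rw [hseg]
      simp only [Bool.false_eq_true, if_false]
      have hne : solveLoopA (PySem.List.enumerate ((0 : Int) :: a) 0)
          (PySem.Set.ofList [0]) 0 0 t ≠ "YES" := by
        intro hy
        apply hp
        apply (pairs_cons_zero _ t (by omega)).mp
        rw [← hA]
        exact (loopA_top _ t).mp hy
      rcases loopA_yes_or_no (PySem.List.enumerate ((0 : Int) :: a) 0)
          (PySem.Set.ofList [0]) 0 0 t with hy | hn
      · exact absurd hy hne
      · exact hn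
  · have hge : even ≥ odd := by omega
    simp only [heo, hge, if_true, if_false]
    have hone : (wsig 0 a).map (fun y => (1 : Int) * y) = wsig 0 a := by
      simp
    rw [hone]
    by_cases hp : Pairs (wsig 0 a) t
    · have hseg : segAny (wsig 0 a) t = true :=
        (segAny_iff _ _).mpr ((pairs_iff_seg _ _).mp hp)
      rw [hseg, if_pos rfl]
      exact (loopA_top _ t).mpr hp
    · have hseg : segAny (wsig 0 a) t = false := by
        cases hx : segAny (wsig 0 a) t
        · rfl
        · exact absurd ((pairs_iff_seg _ _).mpr ((segAny_iff _ _).mp hx)) hp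
      rw [hseg]
      simp only [Bool.false_eq_true, if_false]
      have hne : solveLoopA (PySem.List.enumerate a 0) (PySem.Set.ofList [0]) 0 0 t ≠ "YES" :=
        fun hy => hp ((loopA_top _ t).mp hy)
      rcases loopA_yes_or_no (PySem.List.enumerate a 0) (PySem.Set.ofList [0]) 0 0 t with hy | hn
      · exact absurd hy hne
      · exact hn

lemma solve_eq_alt (a : List Int) (n : Int) : solve a n = solve_alt a n := by
  simp only [solve, solve_alt]
  generalize (PySem.List.pyRange 0 n 2).foldl (fun s i => s + PySem.List.pyGetD a i 0) 0 = even
  generalize (PySem.List.pyRange 1 n 2).foldl (fun s i => s + PySem.List.pyGetD a i 0) 0 = odd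
  by_cases h1 : (PySem.Int.mod |even - odd| 2 == 1) = true
  · rw [if_pos h1, if_pos h1]
  · rw [if_neg h1, if_neg h1]
    by_cases h2 : (|even - odd| == 0) = true
    · rw [if_pos h2, if_pos h2]
    · rw [if_neg h2, if_neg h2]
      apply tail_eq
      have hne : |even - odd| ≠ 0 := by simpa using h2
      have hnm : PySem.Int.mod |even - odd| 2 ≠ 1 := by simpa using h1
      have habs : (0 : Int) ≤ |even - odd| := abs_nonneg _
      rw [PySem.Int.mod_eq_emod_of_pos (by norm_num)] at hnm
      have hd2 : (2 : Int) ≤ |even - odd| := by omega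
      rw [PySem.Int.floordiv_eq_ediv_of_pos (by norm_num)]
      omega

-- ===== VERDICT (by name: the statement is the Claim_ definition above) =====
theorem solve_spec : Claim_equal_solve := by
  intro a n _ _
  unfold Spec_solve
  exact solve_eq_alt a n
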